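-- pv_equiv track=rewrite | github.com/AdamGabet/LabTools | research/multimodal_baseline/14_find_viable_raw_cohorts.py | count_any_two
-- ===== SOURCE A (Python) =====
-- STAGES = ["baseline", "02_00_visit", "04_00_visit", "06_00_visit"]
--
-- def count_any_two(modality_maps):
--     subjects = {}
--     universe = set().union(*[set(modality_maps[name].keys()) for name in modality_maps])
--     for reg in universe:
--         shared = set(STAGES)
--         for name in modality_maps:
--             shared &= modality_maps[name].get(reg, set())
--         if len(shared) >= 2:
--             subjects[reg] = tuple(sorted(shared))
--     return subjects
-- ===== SOURCE B (Python) =====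
-- STAGES = ["baseline", "02_00_visit", "04_00_visit", "06_00_visit"]
--
-- def count_any_two(modality_maps):
--     M = len(modality_maps)
--     counts = {}
--     for mp in modality_maps.values():
--         for reg, stages in mp.items():
--             c = counts.setdefault(reg, {})
--             for st in stages:
--                 if st in STAGES:
--                     c[st] = c.get(st, 0) + 1
--     result = {}
--     for reg, c in counts.items():
--         shared = sorted(st for st, n in c.items() if n == M)
--         if len(shared) >= 2:
--             result[reg] = tuple(shared)
--     return result
-- ===== Notes on version B (the rewrite author's own statement) =====
-- stated objective: alternative
-- what changed: A intersects the stage sets of every modality for each region of the key universe; B makes a single tally pass building per-region stage counters and then keeps the stages whose count equals the number of modalities, so the per-region set intersections disappear.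
import Mathlib
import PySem

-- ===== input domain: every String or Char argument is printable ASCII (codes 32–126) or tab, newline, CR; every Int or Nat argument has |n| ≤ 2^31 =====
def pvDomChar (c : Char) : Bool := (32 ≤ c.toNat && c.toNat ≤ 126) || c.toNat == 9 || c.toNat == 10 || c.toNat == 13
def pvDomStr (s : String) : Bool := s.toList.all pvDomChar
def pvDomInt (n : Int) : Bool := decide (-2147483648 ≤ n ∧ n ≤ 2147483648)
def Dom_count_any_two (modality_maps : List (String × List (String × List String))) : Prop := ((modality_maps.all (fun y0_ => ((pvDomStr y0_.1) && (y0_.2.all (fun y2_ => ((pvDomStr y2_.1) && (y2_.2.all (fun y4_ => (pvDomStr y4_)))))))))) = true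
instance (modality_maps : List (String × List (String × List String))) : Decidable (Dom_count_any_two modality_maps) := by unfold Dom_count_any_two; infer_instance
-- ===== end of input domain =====

-- B replaces A's per-region set intersections with one tally pass (a dict of per-region
-- stage counters) followed by a filter keeping stages counted in every modality (objective:
-- alternative decomposition, similar cost).

-- ===== PORT A =====
def pySTAGES : List String := ["baseline", "02_00_visit", "04_00_visit", "06_00_visit"]

-- modality_maps[name].get(reg, set()) : first-match lookup in the inner dict, default empty
def pvLookup (d : List (String × List String)) (reg : String) : List String :=
  (PySem.Dict.mk d).getD reg []

-- shared = set(STAGES); for name in modality_maps: shared &= modality_maps[name].get(reg, set())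
def pvSharedA (mm : List (String × List (String × List String))) (reg : String) : PySem.Set String :=
  mm.foldl (fun sh p => PySem.Set.inter sh (pvLookup p.2 reg)) (PySem.Set.ofList pySTAGES)

-- universe = set().union(*[set(modality_maps[name].keys()) for name in modality_maps])
def pvUniverse (mm : List (String × List (String × List String))) : PySem.Set String :=
  (mm.map (fun p => PySem.Set.ofList (p.2.map Prod.fst))).foldl PySem.Set.union PySem.Set.empty

def count_any_two (modality_maps : List (String × List (String × List String))) : List (String × List String) :=
  ((pvUniverse modality_maps).foldl
    (fun (subjects : PySem.Dict String (List String)) reg =>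
      if 2 ≤ PySem.Set.len (pvSharedA modality_maps reg) then
        subjects.insert reg (PySem.List.sorted (pvSharedA modality_maps reg) (fun x => x) false)
      else subjects)
    PySem.Dict.empty).items

-- ===== PORT B =====
-- for st in stages: if st in STAGES: c[st] = c.get(st, 0) + 1
def pvStageFold (c : PySem.Dict String Int) (stages : List String) : PySem.Dict String Int :=
  stages.foldl (fun c st => if pySTAGES.contains st then c.insert st (c.getD st 0 + 1) else c) c

-- one modality: for reg, stages in mp.items(): c = counts.setdefault(reg, {}); …
def pvOuterStep (cs : PySem.Dict String (PySem.Dict String Int))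
    (p : String × List (String × List String)) : PySem.Dict String (PySem.Dict String Int) :=
  p.2.foldl (fun cs q => cs.insert q.1 (pvStageFold (cs.getD q.1 PySem.Dict.empty) q.2)) cs

def pvTally (mm : List (String × List (String × List String))) :
    PySem.Dict String (PySem.Dict String Int) :=
  mm.foldl pvOuterStep PySem.Dict.empty

-- shared = sorted(st for st, n in c.items() if n == M)
def pvSharedB (c : PySem.Dict String Int) (M : Int) : List String :=
  PySem.List.sorted ((c.items.filter (fun sn => sn.2 == M)).map Prod.fst) (fun x => x) false

def count_any_two_alt (modality_maps : List (String × List (String × List String))) : List (String × List String) :=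
  ((pvTally modality_maps).items.foldl
    (fun (res : PySem.Dict String (List String)) rc =>
      if 2 ≤ ((pvSharedB rc.2 (modality_maps.length : Int)).length : Int) then
        res.insert rc.1 (pvSharedB rc.2 (modality_maps.length : Int))
      else res)
    PySem.Dict.empty).items

-- ===== PRECONDITION & SPEC =====
-- Pre_ excludes association lists in which some inner dict has duplicate region keys or some
-- stage list has duplicate elements: those lists do not encode any Python dict/set input
-- (A's argument is a dict of dicts of sets), so no input the Python A accepts is excluded.
def Pre_count_any_two (modality_maps : List (String × List (String × List String))) : Prop :=
  ∀ p ∈ modality_maps, (p.2.map Prod.fst).Nodup ∧ ∀ q ∈ p.2, q.2.Nodup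

instance (modality_maps : List (String × List (String × List String))) : Decidable (Pre_count_any_two modality_maps) := by unfold Pre_count_any_two; infer_instance

def pvWitness_count_any_two : (List (String × List (String × List String))) :=
  [("dti", [("r1", ["baseline", "02_00_visit"]), ("r2", ["baseline"])]),
   ("fmri", [("r1", ["02_00_visit", "baseline", "04_00_visit"])])]

def Spec_count_any_two (modality_maps : List (String × List (String × List String))) (out : List (String × List String)) : Prop := out = count_any_two_alt modality_maps
instance (modality_maps : List (String × List (String × List String))) (out : List (String × List String)) : Decidable (Spec_count_any_two modality_maps out) := by unfold Spec_count_any_two; infer_instance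

-- ===== CLAIM (what is proved, stated in full; the proofs are below) =====
def Claim_equal_count_any_two : Prop := ∀ (modality_maps : List (String × List (String × List String))), Dom_count_any_two modality_maps → Pre_count_any_two modality_maps → Spec_count_any_two modality_maps (count_any_two modality_maps)

-- ===== LEMMAS AND PROOFS =====

-- generic facts about folds of Set.update
theorem pv_mem_foldl_update {β : Type} (f : β → List String) (l : List β) :
    ∀ (s : PySem.Set String) (x : String),
      x ∈ l.foldl (fun ks b => PySem.Set.update ks (f b)) s ↔ x ∈ s ∨ ∃ b ∈ l, x ∈ f b := by
  induction l with
  | nil => simp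
  | cons h t ih =>
    intro s x
    simp only [List.foldl_cons, ih, PySem.Set.mem_update, List.mem_cons]
    constructor
    · rintro ((hs | hf) | ⟨b, hb, hx⟩)
      · exact Or.inl hs
      · exact Or.inr ⟨h, Or.inl rfl, hf⟩
      · exact Or.inr ⟨b, Or.inr hb, hx⟩
    · rintro (hs | ⟨b, (rfl | hb), hx⟩)
      · exact Or.inl (Or.inl hs)
      · exact Or.inl (Or.inr hx)
      · exact Or.inr ⟨b, hb, hx⟩

theorem pv_nodup_foldl_update {β : Type} (f : β → List String) (l : List β) :
    ∀ (s : PySem.Set String), s.Nodup → (l.foldl (fun ks b => PySem.Set.update ks (f b)) s).Nodup := by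
  induction l with
  | nil => intro s hs; simpa using hs
  | cons h t ih =>
    intro s hs
    exact ih _ (PySem.Set.nodup_update _ _ hs)

theorem pv_universe_eq (mm : List (String × List (String × List String))) :
    pvUniverse mm = mm.foldl (fun ks p => PySem.Set.update ks (p.2.map Prod.fst)) [] := by
  unfold pvUniverse
  rw [List.foldl_map]
  apply PySem.List.foldl_congr_mem
  intro acc p _
  show PySem.Set.update acc (PySem.Set.ofList (p.2.map Prod.fst)) = _
  rw [PySem.Set.update_eq_append_filter, PySem.Set.update_eq_append_filter, PySem.Set.ofList_ofList]

theorem pv_tally_keys (mm : List (String × List (String × List String))) :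
    (pvTally mm).keys = mm.foldl (fun ks p => PySem.Set.update ks (p.2.map Prod.fst)) [] := by
  unfold pvTally
  have aux : ∀ (l : List (String × List (String × List String)))
      (cs : PySem.Dict String (PySem.Dict String Int)),
      (l.foldl pvOuterStep cs).keys = l.foldl (fun ks p => PySem.Set.update ks (p.2.map Prod.fst)) cs.keys := by
    intro l
    induction l with
    | nil => intro cs; rfl
    | cons h t ih =>
      intro cs
      simp only [List.foldl_cons, ih]
      congr 1
      exact PySem.Dict.keys_foldl_insert_key h.2 Prod.fst _ cs
  simpa using aux mm PySem.Dict.empty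

theorem pv_nodup_universe (mm : List (String × List (String × List String))) :
    (pvUniverse mm).Nodup := by
  rw [pv_universe_eq]
  exact pv_nodup_foldl_update _ mm [] List.nodup_nil

-- first-match lookup facts
theorem pv_lookup_nil (reg : String) : pvLookup [] reg = [] := rfl

theorem pv_lookup_cons_eq (q : String × List String) (t : List (String × List String)) (reg : String)
    (h : q.1 = reg) : pvLookup (q :: t) reg = q.2 := by
  obtain ⟨k, v⟩ := q
  subst h
  simp [pvLookup, PySem.Dict.getD_eq_get?_getD, PySem.Dict.get?_mk_cons]

theorem pv_lookup_cons_ne (q : String × List String) (t : List (String × List String)) (reg : String)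
    (h : q.1 ≠ reg) : pvLookup (q :: t) reg = pvLookup t reg := by
  obtain ⟨k, v⟩ := q
  simp only [pvLookup, PySem.Dict.getD_eq_get?_getD, PySem.Dict.get?_mk_cons]
  simp only [ne_eq] at h
  simp [h]

theorem pv_lookup_cases (d : List (String × List String)) (reg : String) :
    pvLookup d reg = [] ∨ ∃ q ∈ d, q.1 = reg ∧ pvLookup d reg = q.2 := by
  induction d with
  | nil => exact Or.inl rfl
  | cons q t ih =>
    by_cases h : q.1 = reg
    · exact Or.inr ⟨q, List.mem_cons_self, h, pv_lookup_cons_eq q t reg h⟩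
    · rw [pv_lookup_cons_ne q t reg h]
      rcases ih with h1 | ⟨q', hq', h1, h2⟩
      · exact Or.inl h1
      · exact Or.inr ⟨q', List.mem_cons_of_mem _ hq', h1, h2⟩

-- A-side shared set
theorem pv_mem_sharedA (mm : List (String × List (String × List String))) (reg st : String) :
    st ∈ pvSharedA mm reg ↔ st ∈ pySTAGES ∧ ∀ p ∈ mm, st ∈ pvLookup p.2 reg := by
  unfold pvSharedA
  have aux : ∀ (l : List (String × List (String × List String))) (init : PySem.Set String),
      st ∈ l.foldl (fun sh p => PySem.Set.inter sh (pvLookup p.2 reg)) init ↔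
        st ∈ init ∧ ∀ p ∈ l, st ∈ pvLookup p.2 reg := by
    intro l
    induction l with
    | nil => simp
    | cons h t ih =>
      intro init
      simp only [List.foldl_cons, ih, PySem.Set.mem_inter, List.mem_cons]
      constructor
      · rintro ⟨⟨h1, h2⟩, h3⟩
        exact ⟨h1, fun p hp => hp.elim (fun e => e ▸ h2) (h3 p)⟩
      · rintro ⟨h1, h2⟩
        exact ⟨⟨h1, h2 h (Or.inl rfl)⟩, fun p hp => h2 p (Or.inr hp)⟩
  rw [aux, PySem.Set.mem_ofList]

theorem pv_nodup_foldl_inter (reg : String) (l : List (String × List (String × List String))) :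
    ∀ (init : PySem.Set String), init.Nodup →
      (l.foldl (fun sh p => PySem.Set.inter sh (pvLookup p.2 reg)) init).Nodup := by
  induction l with
  | nil => intro init h; simpa using h
  | cons h t ih =>
    intro init hinit
    exact ih _ (PySem.Set.nodup_inter _ _ hinit)

theorem pv_nodup_sharedA (mm : List (String × List (String × List String))) (reg : String) :
    (pvSharedA mm reg).Nodup := by
  exact pv_nodup_foldl_inter reg mm _ (PySem.Set.nodup_ofList _)

-- B-side stage counter
theorem pv_stageFold_getD (c : PySem.Dict String Int) (l : List String) (st : String) :
    (pvStageFold c l).getD st 0 = c.getD st 0 + ((l.filter pySTAGES.contains).count st : Int) := by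
  unfold pvStageFold
  rw [PySem.List.foldl_if_eq_foldl_filter pySTAGES.contains
        (fun (c : PySem.Dict String Int) st => c.insert st (c.getD st 0 + 1)) l c]
  rw [PySem.Dict.getD_foldl_insert_add_one]

theorem pv_stageFold_keys (c : PySem.Dict String Int) (l : List String) :
    (pvStageFold c l).keys = PySem.Set.update c.keys (l.filter pySTAGES.contains) := by
  unfold pvStageFold
  rw [PySem.List.foldl_if_eq_foldl_filter pySTAGES.contains
        (fun (c : PySem.Dict String Int) st => c.insert st (c.getD st 0 + 1)) l c]
  exact PySem.Dict.keys_foldl_insert _ _ _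

-- the value of one modality pass at a fixed region
theorem pv_outerStep_getD (p : String × List (String × List String))
    (cs : PySem.Dict String (PySem.Dict String Int)) (reg : String)
    (hnd : (p.2.map Prod.fst).Nodup) :
    ((pvOuterStep cs p).getD reg PySem.Dict.empty) =
      pvStageFold (cs.getD reg PySem.Dict.empty) (pvLookup p.2 reg) := by
  unfold pvOuterStep
  revert cs hnd
  induction p.2 with
  | nil => intro cs _; simp [pv_lookup_nil, pvStageFold]
  | cons q t ih =>
    intro cs hnd
    simp only [List.map_cons, List.nodup_cons] at hnd
    by_cases hq : q.1 = reg
    · rw [pv_lookup_cons_eq q t reg hq]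
      have hnm : reg ∉ t.map Prod.fst := hq ▸ hnd.1
      have preserve : ∀ (d : List (String × List String)), reg ∉ d.map Prod.fst →
          ∀ (cs' : PySem.Dict String (PySem.Dict String Int)),
          ((d.foldl (fun cs q => cs.insert q.1 (pvStageFold (cs.getD q.1 PySem.Dict.empty) q.2)) cs').getD reg PySem.Dict.empty) = cs'.getD reg PySem.Dict.empty := by
        intro d
        induction d with
        | nil => intro _ cs'; rfl
        | cons q' t' ih' =>
          intro hmem cs'
          simp only [List.map_cons, List.mem_cons, not_or] at hmem
          rw [List.foldl_cons, ih' hmem.2, PySem.Dict.getD_insert_of_ne _ _ _ hmem.1]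
      rw [List.foldl_cons, preserve t hnm, hq, PySem.Dict.getD_insert_self]
    · rw [pv_lookup_cons_ne q t reg hq, List.foldl_cons]
      rw [ih (cs.insert q.1 (pvStageFold (cs.getD q.1 PySem.Dict.empty) q.2)) hnd.2]
      congr 1
      rw [PySem.Dict.getD_insert_of_ne _ _ _ (fun e => hq e.symm)]

theorem pv_tally_getD (mm : List (String × List (String × List String))) (reg : String)
    (hnd : ∀ p ∈ mm, (p.2.map Prod.fst).Nodup) :
    ∀ (st : String),
      ((pvTally mm).getD reg PySem.Dict.empty).getD st 0 =
        (mm.map (fun p => (((pvLookup p.2 reg).filter pySTAGES.contains).count st : Int))).sum := by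
  intro st
  unfold pvTally
  have aux : ∀ (l : List (String × List (String × List String))),
      (∀ p ∈ l, (p.2.map Prod.fst).Nodup) →
      ∀ (cs : PySem.Dict String (PySem.Dict String Int)),
      ((l.foldl pvOuterStep cs).getD reg PySem.Dict.empty).getD st 0 =
        (cs.getD reg PySem.Dict.empty).getD st 0 +
          (l.map (fun p => (((pvLookup p.2 reg).filter pySTAGES.contains).count st : Int))).sum := by
    intro l
    induction l with
    | nil => intro _ cs; simp
    | cons h t ih =>
      intro hnd cs
      rw [List.foldl_cons, ih (fun p hp => hnd p (List.mem_cons_of_mem _ hp))]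
      rw [pv_outerStep_getD h cs reg (hnd h List.mem_cons_self), pv_stageFold_getD]
      simp only [List.map_cons, List.sum_cons]
      ring
  rw [aux mm hnd PySem.Dict.empty]
  simp

theorem pv_tally_keys_at (mm : List (String × List (String × List String))) (reg : String)
    (hnd : ∀ p ∈ mm, (p.2.map Prod.fst).Nodup) :
    ((pvTally mm).getD reg PySem.Dict.empty).keys =
      mm.foldl (fun ks p => PySem.Set.update ks ((pvLookup p.2 reg).filter pySTAGES.contains)) [] := by
  unfold pvTally
  have aux : ∀ (l : List (String × List (String × List String))),
      (∀ p ∈ l, (p.2.map Prod.fst).Nodup) →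
      ∀ (cs : PySem.Dict String (PySem.Dict String Int)),
      ((l.foldl pvOuterStep cs).getD reg PySem.Dict.empty).keys =
        l.foldl (fun ks p => PySem.Set.update ks ((pvLookup p.2 reg).filter pySTAGES.contains))
          ((cs.getD reg PySem.Dict.empty).keys) := by
    intro l
    induction l with
    | nil => intro _ cs; rfl
    | cons h t ih =>
      intro hnd cs
      rw [List.foldl_cons, ih (fun p hp => hnd p (List.mem_cons_of_mem _ hp)), List.foldl_cons]
      congr 1
      rw [pv_outerStep_getD h cs reg (hnd h List.mem_cons_self), pv_stageFold_keys]
  rw [aux mm hnd PySem.Dict.empty]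
  rfl

theorem pv_sum_le_length (l : List Int) (h : ∀ x ∈ l, x ≤ 1) : l.sum ≤ (l.length : Int) := by
  induction l with
  | nil => simp
  | cons a t ih =>
    simp only [List.sum_cons, List.length_cons]
    have h1 := h a (List.mem_cons_self)
    have h2 := ih (fun x hx => h x (List.mem_cons_of_mem _ hx))
    push_cast
    omega

theorem pv_sum_eq_length_iff (l : List Int) (h : ∀ x ∈ l, x ≤ 1) :
    l.sum = (l.length : Int) ↔ ∀ x ∈ l, x = 1 := by
  induction l with
  | nil => simp
  | cons a t ih =>
    have h1 := h a (List.mem_cons_self)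
    have ht : ∀ x ∈ t, x ≤ 1 := fun x hx => h x (List.mem_cons_of_mem _ hx)
    have h2 := pv_sum_le_length t ht
    simp only [List.sum_cons, List.length_cons, List.mem_cons]
    constructor
    · intro he
      have ha : a = 1 ∧ t.sum = (t.length : Int) := by push_cast at he ⊢; omega
      intro x hx
      rcases hx with rfl | hx
      · exact ha.1
      · exact (ih ht).1 ha.2 x hx
    · intro hx
      have ha : a = 1 := hx a (Or.inl rfl)
      have hts : t.sum = (t.length : Int) := (ih ht).2 (fun x h' => hx x (Or.inr h'))
      push_cast
      omega

-- keys of the tally at a region: its members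
theorem pv_mem_tally_keys_at (mm : List (String × List (String × List String))) (reg st : String)
    (hnd : ∀ p ∈ mm, (p.2.map Prod.fst).Nodup) :
    st ∈ ((pvTally mm).getD reg PySem.Dict.empty).keys ↔
      ∃ p ∈ mm, st ∈ (pvLookup p.2 reg).filter pySTAGES.contains := by
  rw [pv_tally_keys_at mm reg hnd, pv_mem_foldl_update]
  simp

theorem pv_nodup_tally_keys_at (mm : List (String × List (String × List String))) (reg : String)
    (hnd : ∀ p ∈ mm, (p.2.map Prod.fst).Nodup) :
    ((pvTally mm).getD reg PySem.Dict.empty).keys.Nodup := by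
  rw [pv_tally_keys_at mm reg hnd]
  exact pv_nodup_foldl_update _ mm [] List.nodup_nil

theorem pv_lookup_nodup (mm : List (String × List (String × List String)))
    (p : String × List (String × List String)) (reg : String)
    (hpre : Pre_count_any_two mm) (hp : p ∈ mm) : (pvLookup p.2 reg).Nodup := by
  rcases pv_lookup_cases p.2 reg with h | ⟨q, hq, _, h⟩
  · rw [h]; exact List.nodup_nil
  · rw [h]; exact (hpre p hp).2 q hq

-- the core pointwise fact: B's shared list is A's shared set, sorted
theorem pv_shared_eq (mm : List (String × List (String × List String))) (reg : String)
    (hpre : Pre_count_any_two mm) (hne : mm ≠ []) :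
    pvSharedB ((pvTally mm).getD reg PySem.Dict.empty) (mm.length : Int) =
      PySem.List.sorted (pvSharedA mm reg) (fun x => x) false := by
  have hnd : ∀ p ∈ mm, (p.2.map Prod.fst).Nodup := fun p hp => (hpre p hp).1
  set c := (pvTally mm).getD reg PySem.Dict.empty with hc
  have hkn : c.keys.Nodup := pv_nodup_tally_keys_at mm reg hnd
  -- B's unsorted list is a filter of the keys
  have hitems : c.items = c.keys.map (fun k => (k, c.getD k 0)) :=
    PySem.Dict.items_eq_map_keys c hkn 0
  have hblist : (c.items.filter (fun sn => sn.2 == (mm.length : Int))).map Prod.fst =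
      c.keys.filter (fun k => c.getD k 0 == (mm.length : Int)) := by
    rw [hitems, List.filter_map, List.map_map]
    simp [Function.comp_def]
  -- membership in B's list equals membership in A's shared set
  have hmemiff : ∀ st, st ∈ c.keys.filter (fun k => c.getD k 0 == (mm.length : Int)) ↔
      st ∈ pvSharedA mm reg := by
    intro st
    rw [List.mem_filter, pv_mem_sharedA, pv_mem_tally_keys_at mm reg st hnd, hc,
      pv_tally_getD mm reg hnd st]
    have hterm : ∀ p ∈ mm, (((pvLookup p.2 reg).filter pySTAGES.contains).count st : Int) ≤ 1 := by
      intro p hp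
      have : ((pvLookup p.2 reg).filter pySTAGES.contains).count st ≤ 1 :=
        List.nodup_iff_count_le_one.mp ((pv_lookup_nodup mm p reg hpre hp).filter _) st
      exact_mod_cast this
    have hterm' : ∀ x ∈ mm.map (fun p => (((pvLookup p.2 reg).filter pySTAGES.contains).count st : Int)), x ≤ 1 := by
      intro x hx
      rcases List.mem_map.1 hx with ⟨p, hp, rfl⟩
      exact hterm p hp
    constructor
    · rintro ⟨hk, hv⟩
      rcases hk with ⟨p0, hp0, hm0⟩
      have hst : st ∈ pySTAGES := by
        have := (List.mem_filter.1 hm0).2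
        simpa using this
      refine ⟨hst, ?_⟩
      have hv' : (mm.map (fun p => (((pvLookup p.2 reg).filter pySTAGES.contains).count st : Int))).sum = (mm.length : Int) := by
        simpa using (beq_iff_eq.1 hv)
      have hlen : (mm.map (fun p => (((pvLookup p.2 reg).filter pySTAGES.contains).count st : Int))).length = mm.length := by
        simp
      rw [← hlen] at hv'
      have hall := (pv_sum_eq_length_iff _ hterm').1 (by exact_mod_cast hv')
      intro p hp
      have h1 : (((pvLookup p.2 reg).filter pySTAGES.contains).count st : Int) = 1 :=
        hall _ (List.mem_map_of_mem hp)
      have h1' : ((pvLookup p.2 reg).filter pySTAGES.contains).count st = 1 := by exact_mod_cast h1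
      have : st ∈ (pvLookup p.2 reg).filter pySTAGES.contains := by
        rw [← List.count_pos_iff]
        omega
      exact (List.mem_filter.1 this).1
    · rintro ⟨hst, hall⟩
      have hmem1 : ∀ p ∈ mm, st ∈ (pvLookup p.2 reg).filter pySTAGES.contains := by
        intro p hp
        exact List.mem_filter.2 ⟨hall p hp, by simpa using hst⟩
      have hone : ∀ x ∈ mm.map (fun p => (((pvLookup p.2 reg).filter pySTAGES.contains).count st : Int)), x = 1 := by
        intro x hx
        rcases List.mem_map.1 hx with ⟨p, hp, rfl⟩
        have hle := hterm p hp
        have hpos : 0 < ((pvLookup p.2 reg).filter pySTAGES.contains).count st :=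
          List.count_pos_iff.2 (hmem1 p hp)
        have : (0:Int) < (((pvLookup p.2 reg).filter pySTAGES.contains).count st : Int) := by exact_mod_cast hpos
        omega
      refine ⟨?_, ?_⟩
      · rcases List.exists_mem_of_ne_nil mm hne with ⟨p0, hp0⟩
        exact ⟨p0, hp0, hmem1 p0 hp0⟩
      · have := (pv_sum_eq_length_iff _ hterm').2 hone
        rw [beq_iff_eq]
        simpa using this
  -- both are Nodup with the same members: a permutation, so sorted agrees
  have hbn : (c.keys.filter (fun k => c.getD k 0 == (mm.length : Int))).Nodup := hkn.filter _
  have hperm : (c.keys.filter (fun k => c.getD k 0 == (mm.length : Int))).Perm (pvSharedA mm reg) :=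
    (List.perm_ext_iff_of_nodup hbn (pv_nodup_sharedA mm reg)).2 hmemiff
  unfold pvSharedB
  rw [hblist]
  exact PySem.List.sorted_eq_sorted_of_perm _ _ _ (fun a b h => h) hperm

theorem pv_nodup_tally_keys (mm : List (String × List (String × List String))) :
    (pvTally mm).keys.Nodup := by
  rw [pv_tally_keys]
  exact pv_nodup_foldl_update _ mm [] List.nodup_nil

theorem pv_main (mm : List (String × List (String × List String)))
    (hpre : Pre_count_any_two mm) (hne : mm ≠ []) :
    count_any_two mm = count_any_two_alt mm := by
  have hnd : ∀ p ∈ mm, (p.2.map Prod.fst).Nodup := fun p hp => (hpre p hp).1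
  have hAB : ∀ k, pvSharedB ((pvTally mm).getD k PySem.Dict.empty) (mm.length : Int) =
      PySem.List.sorted (pvSharedA mm k) (fun x => x) false :=
    fun k => pv_shared_eq mm k hpre hne
  -- A's loop: a fold of inserts over the regions that pass the test
  unfold count_any_two count_any_two_alt
  rw [PySem.List.foldl_ite_eq_foldl_filter
        (fun reg => 2 ≤ PySem.Set.len (pvSharedA mm reg))
        (fun (subjects : PySem.Dict String (List String)) reg =>
          subjects.insert reg (PySem.List.sorted (pvSharedA mm reg) (fun x => x) false))
        (pvUniverse mm) PySem.Dict.empty]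
  rw [PySem.List.foldl_ite_eq_foldl_filter
        (fun rc => 2 ≤ ((pvSharedB rc.2 (mm.length : Int)).length : Int))
        (fun (res : PySem.Dict String (List String)) rc =>
          res.insert rc.1 (pvSharedB rc.2 (mm.length : Int)))
        ((pvTally mm).items) PySem.Dict.empty]
  have hAfresh := PySem.Dict.items_foldl_insert_fresh
      ((pvUniverse mm).filter (fun reg => decide (2 ≤ PySem.Set.len (pvSharedA mm reg))))
      (fun reg => reg)
      (fun reg => PySem.List.sorted (pvSharedA mm reg) (fun x => x) false)
      PySem.Dict.empty
      (fun a _ => PySem.Dict.contains_empty a)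
      (by simpa using (pv_nodup_universe mm).filter _)
  have hBfresh := PySem.Dict.items_foldl_insert_fresh
      (((pvTally mm).items).filter (fun rc => decide (2 ≤ ((pvSharedB rc.2 (mm.length : Int)).length : Int))))
      Prod.fst
      (fun rc => pvSharedB rc.2 (mm.length : Int))
      PySem.Dict.empty
      (fun a _ => PySem.Dict.contains_empty a.1)
      (by
        have hsub : ((((pvTally mm).items).filter (fun rc => decide (2 ≤ ((pvSharedB rc.2 (mm.length : Int)).length : Int)))).map Prod.fst).Sublist (((pvTally mm).items).map Prod.fst) :=
          List.Sublist.map Prod.fst List.filter_sublist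
        exact hsub.nodup (pv_nodup_tally_keys mm))
  rw [hAfresh, hBfresh]
  -- rewrite B's items as a map over the tally's keys
  rw [PySem.Dict.items_eq_map_keys (pvTally mm) (pv_nodup_tally_keys mm) PySem.Dict.empty]
  rw [List.filter_map, List.map_map]
  rw [pv_tally_keys, ← pv_universe_eq]
  have hfilter : (pvUniverse mm).filter
        ((fun rc => decide (2 ≤ ((pvSharedB rc.2 (mm.length : Int)).length : Int))) ∘
          (fun k => (k, (pvTally mm).getD k PySem.Dict.empty))) =
      (pvUniverse mm).filter (fun reg => decide (2 ≤ PySem.Set.len (pvSharedA mm reg))) := by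
    apply List.filter_congr
    intro k _
    simp only [Function.comp_apply, hAB k, PySem.List.length_sorted, PySem.Set.len,
      decide_eq_decide]
  rw [hfilter]
  apply List.map_congr_left
  intro k _
  simp only [Function.comp_apply, hAB k]

-- ===== VERDICT (by name: the statement is the Claim_ definition above) =====
theorem count_any_two_spec : Claim_equal_count_any_two := by
  intro mm _ hpre
  unfold Spec_count_any_two
  by_cases hne : mm = []
  · subst hne; rfl
  · exact pv_main mm hpre hne
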